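-- pv_equiv track=rewrite | github.com/dje115/ccs-quote-tool | utils/lead_generation_service.py | _extract_leads_from_text
-- ===== SOURCE A (Python) =====
-- from typing import Dict, List, Optional, Any, Tuple
--
-- def _extract_leads_from_text(text: str) -> List[Dict]:
--     """Fallback method to extract lead information from unstructured text"""
--     leads = []
--     lines = text.split('\n')
--
--     current_lead = {}
--     for line in lines:
--         line = line.strip()
--         if not line:
--             if current_lead:
--                 leads.append(current_lead)
--                 current_lead = {}
--             continue
--
--         if 'company' in line.lower() and 'name' in line.lower():
--             current_lead['company_name'] = line.split(':', 1)[-1].strip()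
--         elif 'website' in line.lower():
--             current_lead['website'] = line.split(':', 1)[-1].strip()
--         elif 'description' in line.lower():
--             current_lead['description'] = line.split(':', 1)[-1].strip()
--         elif 'contact' in line.lower() and 'email' in line.lower():
--             current_lead['contact_email'] = line.split(':', 1)[-1].strip()
--         elif 'contact' in line.lower() and 'phone' in line.lower():
--             current_lead['contact_phone'] = line.split(':', 1)[-1].strip()
--
--     if current_lead:
--         leads.append(current_lead)
--
--     return leads
-- ===== SOURCE B (Python) =====
-- def _extract_leads_from_text(text: str):
--     """Two-phase version: partition lines into blank-separated blocks, then
--     classify each block's lines into a lead dict, keeping only non-empty dicts."""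
--     blocks = []
--     cur = []
--     for line in text.split('\n'):
--         s = line.strip()
--         if s:
--             cur.append(s)
--         elif cur:
--             blocks.append(cur)
--             cur = []
--     if cur:
--         blocks.append(cur)
--
--     leads = []
--     for block in blocks:
--         lead = {}
--         for s in block:
--             kv = _classify(s)
--             if kv:
--                 lead[kv[0]] = kv[1]
--         if lead:
--             leads.append(lead)
--     return leads
--
--
-- def _classify(s):
--     """Map one non-blank stripped line to an optional (field, value) pair."""
--     low = s.lower()
--     value = s.split(':', 1)[-1].strip()
--     if 'company' in low and 'name' in low:
--         return ('company_name', value)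
--     if 'website' in low:
--         return ('website', value)
--     if 'description' in low:
--         return ('description', value)
--     if 'contact' in low and 'email' in low:
--         return ('contact_email', value)
--     if 'contact' in low and 'phone' in low:
--         return ('contact_phone', value)
--     return None
-- ===== Notes on version B (the rewrite author's own statement) =====
-- stated objective: alternative
-- what changed: Single mutable-state pass (accumulator dict flushed at blank lines) replaced by a two-phase decomposition: first partition stripped lines into blank-separated blocks, then classify each block into a dict and keep the non-empty ones.
import Mathlib
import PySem

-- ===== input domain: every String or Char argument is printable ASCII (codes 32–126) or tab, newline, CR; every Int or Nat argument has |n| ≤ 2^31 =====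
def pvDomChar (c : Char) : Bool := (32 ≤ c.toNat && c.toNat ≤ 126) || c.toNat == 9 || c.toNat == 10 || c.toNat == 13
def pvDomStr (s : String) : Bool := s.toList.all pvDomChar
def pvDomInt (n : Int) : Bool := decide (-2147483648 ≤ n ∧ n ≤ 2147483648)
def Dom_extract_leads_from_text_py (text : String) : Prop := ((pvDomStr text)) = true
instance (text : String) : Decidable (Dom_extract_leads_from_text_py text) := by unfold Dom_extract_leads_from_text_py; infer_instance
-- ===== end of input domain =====

-- B is the same task decomposed differently: A is a single pass with a mutable current dict
-- flushed at blank lines; B first partitions lines into blank-separated blocks, then builds a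
-- dict per block and keeps the non-empty ones. Same return value; objective: alternative.

-- ===== PORT A =====
-- the first-match field-detection chain of A (one loop iteration's if/elif body);
-- line.split(':', 1)[-1] : splitMax? always returns a non-empty list here, so getLastD "" is exact
def pvFieldA (d : PySem.Dict String String) (l : String) : PySem.Dict String String :=
  let low := PySem.Str.lower l
  let v := PySem.Str.strip (((PySem.Str.splitMax? l ":" 1).getD []).getLastD "")
  if PySem.Str.isIn "company" low && PySem.Str.isIn "name" low then d.insert "company_name" v
  else if PySem.Str.isIn "website" low then d.insert "website" v
  else if PySem.Str.isIn "description" low then d.insert "description" v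
  else if PySem.Str.isIn "contact" low && PySem.Str.isIn "email" low then d.insert "contact_email" v
  else if PySem.Str.isIn "contact" low && PySem.Str.isIn "phone" low then d.insert "contact_phone" v
  else d

def pvStepA (st : List (PySem.Dict String String) × PySem.Dict String String) (line : String) :
    List (PySem.Dict String String) × PySem.Dict String String :=
  let l := PySem.Str.strip line
  if l = "" then
    (if st.2.items.isEmpty then st else (st.1 ++ [st.2], PySem.Dict.empty))
  else (st.1, pvFieldA st.2 l)

def extract_leads_from_text_py (text : String) : List (List (String × String)) :=
  let lines := ((PySem.Str.split? text "\n").getD [])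
  let st := lines.foldl pvStepA ([], PySem.Dict.empty)
  (if st.2.items.isEmpty then st.1 else st.1 ++ [st.2]).map PySem.Dict.items

-- ===== PORT B =====
-- B's _classify: map one stripped line to an optional (field, value) pair
def pvClassify (s : String) : Option (String × String) :=
  let low := PySem.Str.lower s
  let v := PySem.Str.strip (((PySem.Str.splitMax? s ":" 1).getD []).getLastD "")
  if PySem.Str.isIn "company" low && PySem.Str.isIn "name" low then some ("company_name", v)
  else if PySem.Str.isIn "website" low then some ("website", v)
  else if PySem.Str.isIn "description" low then some ("description", v)
  else if PySem.Str.isIn "contact" low && PySem.Str.isIn "email" low then some ("contact_email", v)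
  else if PySem.Str.isIn "contact" low && PySem.Str.isIn "phone" low then some ("contact_phone", v)
  else none

-- phase 1: partition stripped lines into blank-separated blocks
def pvBlocks (lines : List String) : List (List String) :=
  let p := lines.foldl
    (fun (p : List (List String) × List String) line =>
      let s := PySem.Str.strip line
      if s = "" then (if p.2.isEmpty then p else (p.1 ++ [p.2], []))
      else (p.1, p.2 ++ [s]))
    ([], [])
  if p.2.isEmpty then p.1 else p.1 ++ [p.2]

-- phase 2: one dict per block
def pvBlockLead (block : List String) : PySem.Dict String String :=
  block.foldl
    (fun d s => match pvClassify s with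
      | some kv => d.insert kv.1 kv.2
      | none => d)
    PySem.Dict.empty

def extract_leads_from_text_py_alt (text : String) : List (List (String × String)) :=
  ((((pvBlocks (((PySem.Str.split? text "\n").getD []))).map pvBlockLead).filter
      (fun d => !d.items.isEmpty)).map PySem.Dict.items)

-- ===== PRECONDITION & SPEC =====
def Spec_extract_leads_from_text_py (text : String) (out : List (List (String × String))) : Prop := out = extract_leads_from_text_py_alt text
instance (text : String) (out : List (List (String × String))) : Decidable (Spec_extract_leads_from_text_py text out) := by unfold Spec_extract_leads_from_text_py; infer_instance

-- ===== CLAIM (what is proved, stated in full; the proofs are below) =====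
def Claim_equal_extract_leads_from_text_py : Prop := ∀ (text : String), Dom_extract_leads_from_text_py text → Spec_extract_leads_from_text_py text (extract_leads_from_text_py text)

-- ===== LEMMAS AND PROOFS =====

-- A's inline chain computes the same dict update as B's classify-then-insert
theorem pvField_classify (d : PySem.Dict String String) (s : String) :
    (match pvClassify s with
      | some kv => d.insert kv.1 kv.2
      | none => d) = pvFieldA d s := by
  unfold pvClassify pvFieldA
  dsimp only
  split_ifs <;> rfl

theorem pvBlockLead_append (b : List String) (s : String) :
    pvBlockLead (b ++ [s]) = pvFieldA (pvBlockLead b) s := by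
  simp [pvBlockLead, pvField_classify]

theorem pvBlockLead_nil : pvBlockLead [] = PySem.Dict.empty := rfl

-- loop invariant: A's fold state is determined by B's fold state
theorem pvMain (lines : List String) (bacc : List (List String)) (bcur : List String) :
    lines.foldl pvStepA
        ((bacc.map pvBlockLead).filter (fun d => !d.items.isEmpty), pvBlockLead bcur)
      = (((lines.foldl
            (fun (p : List (List String) × List String) line =>
              let s := PySem.Str.strip line
              if s = "" then (if p.2.isEmpty then p else (p.1 ++ [p.2], []))
              else (p.1, p.2 ++ [s]))
            (bacc, bcur)).1.map pvBlockLead).filter (fun d => !d.items.isEmpty),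
         pvBlockLead (lines.foldl
            (fun (p : List (List String) × List String) line =>
              let s := PySem.Str.strip line
              if s = "" then (if p.2.isEmpty then p else (p.1 ++ [p.2], []))
              else (p.1, p.2 ++ [s]))
            (bacc, bcur)).2) := by
  induction lines generalizing bacc bcur with
  | nil => rfl
  | cons line rest ih =>
    simp only [List.foldl_cons]
    by_cases hs : PySem.Str.strip line = ""
    · by_cases hb : bcur.isEmpty
      · have hbc : bcur = [] := by simpa [List.isEmpty_iff] using hb
        subst hbc
        simpa [pvStepA, hs, pvBlockLead_nil] using ih bacc []
      · by_cases he : (pvBlockLead bcur).items.isEmpty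
        · have hcur : pvBlockLead bcur = PySem.Dict.empty := by
            apply PySem.Dict.ext; simpa [List.isEmpty_iff] using he
          have := ih (bacc ++ [bcur]) []
          simpa [pvStepA, hs, hb, he, hcur, pvBlockLead_nil, PySem.Dict.empty, List.filter_append] using this
        · have := ih (bacc ++ [bcur]) []
          simpa [pvStepA, hs, hb, he, pvBlockLead_nil] using this
    · simpa [pvStepA, hs, pvBlockLead_append] using ih bacc (bcur ++ [PySem.Str.strip line])

-- ===== VERDICT (by name: the statement is the Claim_ definition above) =====
theorem extract_leads_from_text_py_spec : Claim_equal_extract_leads_from_text_py := by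
  intro text _
  unfold Spec_extract_leads_from_text_py extract_leads_from_text_py extract_leads_from_text_py_alt pvBlocks
  dsimp only
  have h := pvMain (((PySem.Str.split? text "\n").getD [])) [] []
  simp only [List.map_nil, List.filter_nil, pvBlockLead_nil] at h
  rw [h]
  set q := (((PySem.Str.split? text "\n").getD [])).foldl
      (fun (p : List (List String) × List String) line =>
        let s := PySem.Str.strip line
        if s = "" then (if p.2.isEmpty then p else (p.1 ++ [p.2], []))
        else (p.1, p.2 ++ [s]))
      ([], []) with hq
  by_cases hb : q.2.isEmpty
  · have hbc : q.2 = [] := by simpa [List.isEmpty_iff] using hb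
    simp [hbc, pvBlockLead_nil, PySem.Dict.empty]
  · by_cases he : (pvBlockLead q.2).items.isEmpty
    · simp [hb, he]
    · simp [hb, he]
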